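-- pv_equiv track=rewrite | github.com/padresmurfa/yapl | v4/lexer/shared/tokenized_lines/builder.py | extract_boolean_literal
-- ===== SOURCE A (Python) =====
-- def extract_boolean_literal(from_string):
--     from_string = from_string.strip()
--     for l in ("true", "false"):
--         if from_string.startswith(l):
--             t = from_string[len(l):]
--             if not t:
--                 return l, ""
--             c = t[0]
--             if c in (" ", "]", "}", ")", ","):
--                 return l, t
--     return None, from_string
-- ===== SOURCE B (Python) =====
-- def extract_boolean_literal(from_string):
--     # Tokenize: take the longest terminator-free prefix as a word, then compare it once.
--     s = from_string.strip()
--     i = 0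
--     while i < len(s) and s[i] not in " ]}),":
--         i += 1
--     word = s[:i]
--     if word in ("true", "false"):
--         return word, s[i:]
--     return None, s
-- ===== Notes on version B (the rewrite author's own statement) =====
-- stated objective: alternative
-- what changed: Instead of testing each literal prefix and peeking at the following character, B scans once for the first terminator character, extracts the leading word, and compares that word against the two literals.
import Mathlib
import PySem

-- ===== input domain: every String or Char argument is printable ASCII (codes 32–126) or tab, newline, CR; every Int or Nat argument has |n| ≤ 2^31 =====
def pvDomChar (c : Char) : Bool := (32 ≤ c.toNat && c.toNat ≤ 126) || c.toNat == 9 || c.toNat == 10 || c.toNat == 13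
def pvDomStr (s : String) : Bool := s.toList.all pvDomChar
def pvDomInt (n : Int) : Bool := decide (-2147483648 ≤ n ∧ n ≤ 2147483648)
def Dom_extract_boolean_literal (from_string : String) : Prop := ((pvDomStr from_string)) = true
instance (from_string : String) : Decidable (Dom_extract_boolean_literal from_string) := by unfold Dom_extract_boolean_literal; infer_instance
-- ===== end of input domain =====

-- B replaces A's per-literal prefix-and-next-char test with a single scan that extracts the
-- leading terminator-free word and compares it to the two literals (alternative decomposition).


-- ===== PORT A =====
-- A's tuple-membership test `c in (" ", "]", "}", ")", ",")`
def ablTerm (c : Char) : Bool := c == ' ' || c == ']' || c == '}' || c == ')' || c == ','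

-- the `for l in ("true", "false")` loop with its early returns; t = from_string[len(l):]
def ablLoop (s : List Char) : List String → Option String × String
  | [] => (none, String.ofList s)
  | l :: ls =>
    if PySem.Chars.startswith s l.toList then
      match PySem.List.slice s (some (l.toList.length : Int)) none with
      | [] => (some l, "")
      | c :: rest => if ablTerm c then (some l, String.ofList (c :: rest)) else ablLoop s ls
    else ablLoop s ls

def extract_boolean_literal (from_string : String) : Option String × String :=
  ablLoop (PySem.Chars.strip from_string.toList) ["true", "false"]

-- ===== PORT B =====
-- B's `s[i] not in " ]}),"`
def ablNotTerm (c : Char) : Bool := !(" ]}),".toList.contains c)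

def extract_boolean_literal_alt (from_string : String) : Option String × String :=
  let s := PySem.Chars.strip from_string.toList
  -- the while loop advancing i over non-terminator chars; word = s[:i], remainder = s[i:]
  let word := s.takeWhile ablNotTerm
  if word = "true".toList ∨ word = "false".toList then
    (some (String.ofList word), String.ofList (s.drop word.length))
  else (none, String.ofList s)

-- ===== PRECONDITION & SPEC =====
def Spec_extract_boolean_literal (from_string : String) (out : Option String × String) : Prop := out = extract_boolean_literal_alt from_string
instance (from_string : String) (out : Option String × String) : Decidable (Spec_extract_boolean_literal from_string out) := by unfold Spec_extract_boolean_literal; infer_instance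

-- ===== CLAIM (what is proved, stated in full; the proofs are below) =====
def Claim_equal_extract_boolean_literal : Prop := ∀ (from_string : String), Dom_extract_boolean_literal from_string → Spec_extract_boolean_literal from_string (extract_boolean_literal from_string)

-- ===== LEMMAS AND PROOFS =====

lemma ablLoop_nil (s : List Char) : ablLoop s [] = (none, String.ofList s) := rfl

lemma ablLoop_cons (s : List Char) (l : String) (ls : List String) :
    ablLoop s (l :: ls) =
      if PySem.Chars.startswith s l.toList then
        match PySem.List.slice s (some (l.toList.length : Int)) none with
        | [] => (some l, "")
        | c :: rest => if ablTerm c then (some l, String.ofList (c :: rest)) else ablLoop s ls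
      else ablLoop s ls := rfl

lemma ablNotTerm_eq (c : Char) : ablNotTerm c = !ablTerm c := by
  have h : " ]}),".toList = [' ', ']', '}', ')', ','] := by decide
  by_cases h1 : c = ' ' <;> by_cases h2 : c = ']' <;> by_cases h3 : c = '}' <;>
    by_cases h4 : c = ')' <;> by_cases h5 : c = ',' <;>
    simp [ablNotTerm, ablTerm, h, h1, h2, h3, h4, h5]

-- takeWhile p s picks out exactly the prefixes w (of p-chars) followed by end or a ¬p char
lemma takeWhile_eq_iff (p : Char → Bool) :
    ∀ (w : List Char), w.all p = true → ∀ (s : List Char),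
      (s.takeWhile p = w ↔
        (s.take w.length = w ∧ ∀ c, (s.drop w.length).head? = some c → p c = false)) := by
  intro w
  induction w with
  | nil =>
    intro _ s
    cases s with
    | nil => simp
    | cons a s' =>
      cases h : p a <;> simp [h]
  | cons a w' ih =>
    intro hall s
    rw [List.all_cons, Bool.and_eq_true] at hall
    obtain ⟨ha, hall'⟩ := hall
    cases s with
    | nil => simp
    | cons b s' =>
      by_cases hb : p b = true
      · simp only [List.takeWhile_cons, hb, if_true, List.length_cons, List.take_succ_cons,
          List.drop_succ_cons, List.cons.injEq]
        rw [ih hall' s']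
        tauto
      · have hb' : p b = false := by cases h : p b <;> simp_all
        simp only [List.takeWhile_cons, hb', List.length_cons, List.take_succ_cons,
          List.cons.injEq]
        constructor
        · intro h; exact absurd h (by simp)
        · rintro ⟨⟨hba, -⟩, -⟩; rw [hba] at hb'; rw [hb'] at ha; exact absurd ha (by simp)

lemma core (s : List Char) :
    ablLoop s ["true", "false"] =
      (if s.takeWhile ablNotTerm = "true".toList ∨ s.takeWhile ablNotTerm = "false".toList then
        (some (String.ofList (s.takeWhile ablNotTerm)),
          String.ofList (s.drop (s.takeWhile ablNotTerm).length))
      else (none, String.ofList s)) := by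
  have htrue : "true".toList.all ablNotTerm = true := by decide
  have hfalse : "false".toList.all ablNotTerm = true := by decide
  have iffT := takeWhile_eq_iff ablNotTerm "true".toList htrue s
  have iffF := takeWhile_eq_iff ablNotTerm "false".toList hfalse s
  by_cases h1 : s.takeWhile ablNotTerm = "true".toList
  · obtain ⟨htake, hhead⟩ := iffT.mp h1
    have hsw : PySem.Chars.startswith s "true".toList = true :=
      (PySem.Chars.startswith_iff _ _).mpr (List.prefix_iff_eq_take.mpr htake.symm)
    rw [if_pos (Or.inl h1), h1, ablLoop_cons, if_pos hsw,
      PySem.List.slice_from_natCast s ("true".toList.length), String.ofList_toList]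
    cases hd : s.drop "true".toList.length with
    | nil => simp only [hd]
    | cons c rest =>
      have hc : ablNotTerm c = false := hhead c (by rw [hd]; rfl)
      have hterm : ablTerm c = true := by
        rw [ablNotTerm_eq] at hc; cases h : ablTerm c <;> simp_all
      simp only [hd]
      rw [if_pos hterm]
  · by_cases h2 : s.takeWhile ablNotTerm = "false".toList
    · obtain ⟨htake, hhead⟩ := iffF.mp h2
      have hsnot : PySem.Chars.startswith s "true".toList = false := by
        cases hcc : PySem.Chars.startswith s "true".toList
        · rfl
        · exfalso
          obtain ⟨r, hr⟩ := (PySem.Chars.startswith_iff _ _).mp hcc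
          cases s with
          | nil => simp at htake
          | cons b s' =>
            have hb1 : b = 'f' := by
              have := congrArg List.head? htake
              simpa using this
            have hb2 : b = 't' := by
              have := congrArg List.head? hr
              simpa using this.symm
            rw [hb1] at hb2; exact absurd hb2 (by decide)
      have hsnot' : PySem.Chars.startswith s ['t', 'r', 'u', 'e'] = false := by
        simpa using hsnot
      have hsw : PySem.Chars.startswith s "false".toList = true :=
        (PySem.Chars.startswith_iff _ _).mpr (List.prefix_iff_eq_take.mpr htake.symm)
      rw [if_pos (Or.inr h2), h2, ablLoop_cons, if_neg (by simp [hsnot']), ablLoop_cons,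
        if_pos hsw, PySem.List.slice_from_natCast s ("false".toList.length), String.ofList_toList]
      cases hd : s.drop "false".toList.length with
      | nil => simp only [hd]
      | cons c rest =>
        have hc : ablNotTerm c = false := hhead c (by rw [hd]; rfl)
        have hterm : ablTerm c = true := by
          rw [ablNotTerm_eq] at hc; cases h : ablTerm c <;> simp_all
        simp only [hd]
        rw [if_pos hterm]
    · -- neither literal matches up to a terminator: A falls through both loop iterations
      rw [if_neg (by tauto)]
      have noMatch : ∀ (l : String) (ls : List String),
          l.toList.all ablNotTerm = true →
          s.takeWhile ablNotTerm ≠ l.toList →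
          ablLoop s (l :: ls) = ablLoop s ls := by
        intro l ls hall hne
        rw [ablLoop_cons]
        cases hsw : PySem.Chars.startswith s l.toList with
        | false => rw [if_neg (by simp)]
        | true =>
          rw [if_pos rfl, PySem.List.slice_from_natCast s (l.toList.length)]
          have htake : s.take l.toList.length = l.toList :=
            (List.prefix_iff_eq_take.mp ((PySem.Chars.startswith_iff _ _).mp hsw)).symm
          cases hd : s.drop l.toList.length with
          | nil =>
            exfalso
            exact hne ((takeWhile_eq_iff ablNotTerm l.toList hall s).mpr
              ⟨htake, by intro c hc; rw [hd] at hc; simp at hc⟩)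
          | cons c rest =>
            simp only [hd]
            by_cases hterm : ablTerm c = true
            · exfalso
              refine hne ((takeWhile_eq_iff ablNotTerm l.toList hall s).mpr ⟨htake, ?_⟩)
              intro c' hc'
              rw [hd] at hc'
              simp only [List.head?_cons, Option.some.injEq] at hc'
              rw [← hc', ablNotTerm_eq, hterm]; rfl
            · rw [if_neg hterm]
      rw [noMatch "true" ["false"] htrue h1, noMatch "false" [] hfalse h2, ablLoop_nil]

-- ===== VERDICT (by name: the statement is the Claim_ definition above) =====
theorem extract_boolean_literal_spec : Claim_equal_extract_boolean_literal := by
  intro fs _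
  unfold Spec_extract_boolean_literal extract_boolean_literal extract_boolean_literal_alt
  exact core (PySem.Chars.strip fs.toList)
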